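-- pv_equiv track=rewrite | github.com/yuvalalon510/cryptopals_challenges_python | set1/c1.py | convert_buffer
-- ===== SOURCE A (Python) =====
-- def convert_buffer(block, nbits):
--     res = []
--     padding = 0
--     nbytes = nbits // 8
--     while nbits > 0:
--         if nbits >= 6:
--             digit = (block >> (nbits - 6))
--             nbits -= 6
--         else:
--             padding = 3 - nbytes
--             digit = (block << (6 - nbits)) & 63
--             nbits = 0
--         res.append(b64_digit(digit & 63))
--     res.extend(['=' for i in range(padding)])
--     return res
--
-- def b64_digit(digit):
--     if digit < 26:
--         offset = ord('A')
--         i = digit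
--     elif digit < 52:
--         offset = ord('a')
--         i = digit - 26
--     elif digit < 62:
--         offset = ord('0')
--         i = digit - 52
--     elif digit == 62:
--         return '+'
--     else:
--         return '/'
--
--     return chr(offset + i)
-- ===== SOURCE B (Python) =====
-- B64 = list("ABCDEFGHIJKLMNOPQRSTUVWXYZabcdefghijklmnopqrstuvwxyz0123456789+/")
--
-- def convert_buffer(block, nbits):
--     if nbits <= 0:
--         return []
--     pad = (-nbits) % 6                   # zero bits appended to fill the last 6-bit group
--     m = block << pad                     # left-justify into 6-bit groups
--     digits = []
--     for _ in range((nbits + pad) // 6):  # extract 6-bit groups least-significant first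
--         m, d = divmod(m, 64)
--         digits.append(B64[d])
--     digits.reverse()
--     if pad:
--         digits += ['='] * max(0, 3 - nbits // 8)
--     return digits
-- ===== Notes on version B (the rewrite author's own statement) =====
-- stated objective: alternative
-- what changed: Replaces A's high-to-low while loop with shrinking nbits, loop-carried padding state and a per-digit if/elif chain by: closed-form pad (-nbits)%6, one left-justifying shift, low-to-high digit extraction via divmod(m,64) with a final reverse, characters from a base64 lookup table, and a closed-form '='-count.
import Mathlib
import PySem

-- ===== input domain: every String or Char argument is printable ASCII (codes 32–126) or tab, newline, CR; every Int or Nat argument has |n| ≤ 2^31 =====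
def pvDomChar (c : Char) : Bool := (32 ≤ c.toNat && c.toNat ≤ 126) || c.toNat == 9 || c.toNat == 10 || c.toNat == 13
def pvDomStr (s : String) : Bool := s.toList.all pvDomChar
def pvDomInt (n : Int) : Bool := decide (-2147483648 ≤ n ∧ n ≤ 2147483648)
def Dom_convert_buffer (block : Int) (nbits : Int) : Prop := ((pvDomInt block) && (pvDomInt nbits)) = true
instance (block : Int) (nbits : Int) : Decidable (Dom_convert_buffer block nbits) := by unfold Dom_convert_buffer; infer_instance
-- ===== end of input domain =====

-- B replaces A's high-to-low while loop (shrinking nbits, loop-carried padding, per-digit if-chain)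
-- by a closed-form pad, one left-justifying shift, low-to-high divmod digit extraction with a final
-- reverse, a base64 lookup table and a closed-form '='-count;
-- objective: alternative decomposition.


-- ===== PORT A =====
-- b64_digit: chr(offset + i) is exact here (all code points produced are ASCII)
def b64_digit (digit : Int) : String :=
  if digit < 26 then String.mk [Char.ofNat (65 + digit).toNat]
  else if digit < 52 then String.mk [Char.ofNat (97 + (digit - 26)).toNat]
  else if digit < 62 then String.mk [Char.ofNat (48 + (digit - 52)).toNat]
  else if digit = 62 then "+"
  else "/"

-- the while loop, state (nbits, res, padding); 'x >> k' is floor division by 2^k, 'x << k' is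
-- multiplication by 2^k and 'x & 63' is 'x mod 64' (exact: the shift counts here are ≥ 0)
def cbLoop (block nbytes : Int) (nbits : Int) (res : List String) (padding : Int) : List String × Int :=
  if h : 0 < nbits then
    if h6 : 6 ≤ nbits then
      cbLoop block nbytes (nbits - 6)
        (res ++ [b64_digit (PySem.Int.mod (PySem.Int.floordiv block (2 ^ (nbits - 6).toNat)) 64)]) padding
    else
      cbLoop block nbytes 0
        (res ++ [b64_digit (PySem.Int.mod (PySem.Int.mod (block * 2 ^ (6 - nbits).toNat) 64) 64)]) (3 - nbytes)
  else (res, padding)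
termination_by nbits.toNat
decreasing_by all_goals omega

def convert_buffer (block : Int) (nbits : Int) : List String :=
  let nbytes := PySem.Int.floordiv nbits 8
  let r := cbLoop block nbytes nbits [] 0
  -- res.extend(['=' for i in range(padding)]): empty when padding < 0, hence .toNat
  r.1 ++ List.replicate r.2.toNat "="

-- ===== PORT B =====
-- B64 = list("ABC…/"), a 64-entry lookup table
def b64table : List String :=
  ["A","B","C","D","E","F","G","H","I","J","K","L","M","N","O","P","Q","R","S","T","U","V","W","X","Y","Z",
   "a","b","c","d","e","f","g","h","i","j","k","l","m","n","o","p","q","r","s","t","u","v","w","x","y","z",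
   "0","1","2","3","4","5","6","7","8","9","+","/"]

-- for _ in range(k): m, d = divmod(m, 64); digits.append(B64[d])
-- (B64[d]: d is always in range 0..63 here, so the pyGetD default is never used)
def cbAltLoop : Nat → Int → List String → List String
  | 0, _, digits => digits
  | k+1, m, digits =>
      cbAltLoop k (PySem.Int.floordiv m 64)
        (digits ++ [PySem.List.pyGetD b64table (PySem.Int.mod m 64) ""])

def convert_buffer_alt (block : Int) (nbits : Int) : List String :=
  if nbits ≤ 0 then []
  else
    let pad := PySem.Int.mod (-nbits) 6
    let m := block * 2 ^ pad.toNat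
    let digits := (cbAltLoop (PySem.Int.floordiv (nbits + pad) 6).toNat m []).reverse
    if pad ≠ 0 then digits ++ List.replicate (max 0 (3 - PySem.Int.floordiv nbits 8)).toNat "="
    else digits

-- ===== PRECONDITION & SPEC =====
def Spec_convert_buffer (block : Int) (nbits : Int) (out : List String) : Prop := out = convert_buffer_alt block nbits
instance (block : Int) (nbits : Int) (out : List String) : Decidable (Spec_convert_buffer block nbits out) := by unfold Spec_convert_buffer; infer_instance

-- ===== CLAIM (what is proved, stated in full; the proofs are below) =====
def Claim_equal_convert_buffer : Prop := ∀ (block : Int) (nbits : Int), Dom_convert_buffer block nbits → Spec_convert_buffer block nbits (convert_buffer block nbits)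

-- ===== LEMMAS AND PROOFS =====

-- table lookup B64[x] as a named helper (proof side)
def tblI (x : Int) : String := PySem.List.pyGetD b64table x ""

-- the digits of m in base 64 (floor division), least significant first
def lowD : Nat → Int → List String
  | 0, _ => []
  | k+1, m => tblI (m % 64) :: lowD k (m / 64)

lemma cbAltLoop_eq_lowD : ∀ (k : Nat) (m : Int) (ds : List String),
    cbAltLoop k m ds = ds ++ lowD k m := by
  intro k
  induction k with
  | zero => intro m ds; simp [cbAltLoop, lowD]
  | succ k ih =>
    intro m ds
    rw [cbAltLoop, lowD]
    rw [PySem.Int.mod_eq_emod_of_pos (by norm_num), PySem.Int.floordiv_eq_ediv_of_pos (by norm_num)]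
    rw [ih (m / 64)]
    simp [tblI]

lemma lowD_snoc : ∀ (k : Nat) (m : Int), lowD (k+1) m = lowD k m ++ [tblI (m / 64^k % 64)] := by
  intro k
  induction k with
  | zero => intro m; simp [lowD]
  | succ k ih =>
    intro m
    rw [lowD, ih (m / 64), lowD]
    have h : m / 64 / 64 ^ k = m / 64 ^ (k+1) := by
      rw [Int.ediv_ediv_eq_ediv_mul (by norm_num), pow_succ']
    rw [h]
    simp

lemma b64_digit_eq_tbl : ∀ (d : Int), 0 ≤ d → d < 64 → b64_digit d = PySem.List.pyGetD b64table d "" := by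
  have key : ∀ k : Fin 64, b64_digit ((k : Nat) : Int) = PySem.List.pyGetD b64table ((k : Nat) : Int) "" := by decide
  intro d h0 h64
  have hk : d.toNat < 64 := by omega
  have h : d = (((⟨d.toNat, hk⟩ : Fin 64) : Nat) : Int) := by simp; omega
  rw [h]; exact key _

lemma digit_tbl (x y : Int) (hxy : x = y) (h0 : 0 ≤ x) (h1 : x < 64) :
    b64_digit x = tblI y := by
  rw [b64_digit_eq_tbl x h0 h1, tblI, hxy]

lemma cbLoop_main : ∀ (q : Nat) (r : Nat) (block nbytes p : Int) (res : List String), 1 ≤ r → r ≤ 6 →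
    cbLoop block nbytes ((6*q + r : Nat) : Int) res p =
      (res ++ (lowD (q+1) (block * 2 ^ (6-r))).reverse,
       if r = 6 then p else 3 - nbytes) := by
  intro q
  induction q with
  | zero =>
    intro r block nbytes p res h1 h6
    interval_cases r <;>
    · rw [cbLoop]
      norm_num
      rw [cbLoop]
      norm_num [PySem.Int.mod_eq_emod_of_pos, PySem.Int.floordiv_eq_ediv_of_pos, lowD, lowD]
      try simp only [show Int.toNat 5 = 5 from rfl, show Int.toNat 4 = 4 from rfl,
                     show Int.toNat 3 = 3 from rfl, show Int.toNat 2 = 2 from rfl]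
      try norm_num
      try apply digit_tbl <;> omega
  | succ q ih =>
    intro r block nbytes p res h1 h6
    have hK : 6*(q+1)+r = 6*q+r+6 := by ring
    rw [hK]
    have h0 : (0:Int) < ((6*q+r+6 : Nat) : Int) := by omega
    have h6' : (6:Int) ≤ ((6*q+r+6 : Nat) : Int) := by omega
    rw [cbLoop, dif_pos h0, dif_pos h6']
    have harg : ((6*q+r+6 : Nat) : Int) - 6 = ((6*q+r : Nat) : Int) := by push_cast; ring
    rw [harg]
    simp only [Int.toNat_natCast]
    rw [ih r block nbytes p _ h1 h6]
    have hKpos : (0:Int) < 2 ^ (6*q+r) := by positivity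
    have htop : block * 2 ^ (6-r) / 64 ^ (q+1) = block / 2 ^ (6*q+r) := by
      have hpow : (64:Int) ^ (q+1) = 2 ^ (6-r) * 2 ^ (6*q+r) := by
        have hp1 : (64:Int) ^ (q+1) = 2 ^ (6*(q+1)) := by
          rw [show (64:Int) = 2^6 from by norm_num, ← pow_mul]
        rw [hp1, show 6*(q+1) = (6-r) + (6*q+r) from by omega, pow_add]
      rw [hpow, show block * 2^(6-r) = 2^(6-r) * block from by ring,
          Int.mul_ediv_mul_of_pos _ _ (by positivity : (0:Int) < 2^(6-r))]
    have hdig : b64_digit (PySem.Int.mod (PySem.Int.floordiv block (2 ^ (6*q+r))) 64)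
        = tblI (block * 2 ^ (6-r) / 64 ^ (q+1) % 64) := by
      rw [PySem.Int.mod_eq_emod_of_pos (by norm_num), PySem.Int.floordiv_eq_ediv_of_pos hKpos, htop]
      exact digit_tbl _ _ rfl (Int.emod_nonneg _ (by norm_num)) (Int.emod_lt_of_pos _ (by norm_num))
    rw [lowD_snoc (q+1) (block * 2 ^ (6-r))]
    rw [hdig]
    simp [List.append_assoc]

lemma max_toNat (x : Int) : (max 0 x).toNat = x.toNat := by omega

-- ===== VERDICT (by name: the statement is the Claim_ definition above) =====
theorem convert_buffer_spec : Claim_equal_convert_buffer := by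
  intro block nbits _
  unfold Spec_convert_buffer
  by_cases hpos : 0 < nbits
  · obtain ⟨q, r, h1, h6, hn⟩ : ∃ q r : Nat, 1 ≤ r ∧ r ≤ 6 ∧ nbits = ((6*q+r : Nat) : Int) :=
      ⟨(nbits.toNat - 1)/6, (nbits.toNat - 1)%6 + 1, by omega, by omega, by omega⟩
    subst hn
    simp only [convert_buffer, convert_buffer_alt]
    rw [cbLoop_main q r block (PySem.Int.floordiv ((6*q+r : Nat) : Int) 8) 0 [] h1 h6]
    rw [if_neg (by omega : ¬ ((6*q+r : Nat) : Int) ≤ 0)]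
    by_cases hr : r = 6
    · subst hr
      have hpad : PySem.Int.mod (-((6*q+6 : Nat) : Int)) 6 = 0 := by
        rw [PySem.Int.mod_eq_emod_of_pos (by norm_num)]; omega
      rw [hpad]
      have hfuel : (PySem.Int.floordiv (((6*q+6 : Nat) : Int) + 0) 6).toNat = q + 1 := by
        rw [PySem.Int.floordiv_eq_ediv_of_pos (by norm_num)]; omega
      rw [hfuel]
      rw [cbAltLoop_eq_lowD (q+1) _ []]
      simp
    · have hpad : PySem.Int.mod (-((6*q+r : Nat) : Int)) 6 = ((6-r : Nat) : Int) := by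
        rw [PySem.Int.mod_eq_emod_of_pos (by norm_num)]; omega
      rw [hpad]
      have hfuel : (PySem.Int.floordiv (((6*q+r : Nat) : Int) + ((6-r : Nat) : Int)) 6).toNat
          = q + 1 := by
        rw [PySem.Int.floordiv_eq_ediv_of_pos (by norm_num)]; omega
      rw [hfuel]
      rw [cbAltLoop_eq_lowD (q+1) _ []]
      rw [if_neg hr, if_pos (by omega : ¬ ((6-r : Nat) : Int) = 0)]
      simp [max_toNat]
  · rw [convert_buffer, convert_buffer_alt, cbLoop, dif_neg hpos, if_pos (by omega : nbits ≤ 0)]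
    simp
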